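-- pv_equiv track=rewrite | github.com/veryfansome/germ | bot/lang/controllers/english.py | extract_entity_idx_groups
-- ===== SOURCE A (Python) =====
-- def extract_entity_idx_groups(labels):
--     entities = []
--     current_entity = None
--     current_indices = []
--
--     for index, label in enumerate(labels):
--         if label.startswith('B-'):  # Beginning of an entity
--             # If we're in the middle of collecting an entity, store it
--             if current_entity is not None:
--                 entities.append((current_entity, list(current_indices)))
--                 current_indices = []
--             # Start a new entity
--             current_entity = label[2:]
--             current_indices.append(index)
--         elif label.startswith('I-') and current_entity:  # Inside an entity
--             if label[2:] == current_entity: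
--                 current_indices.append(index)
--             else:
--                 # If it's a continuation of a different entity, store current and reset
--                 entities.append((current_entity, list(current_indices)))
--                 current_entity = None
--                 current_indices = []
--         else:
--             # If this is an "O" or unexpected format, store current entity
--             if current_entity is not None:
--                 entities.append((current_entity, list(current_indices)))
--                 current_entity = None
--                 current_indices = []
--     # To store any entity that could end at the last element
--     if current_entity is not None:
--         entities.append((current_entity, current_indices))
--     return entities
-- ===== SOURCE B (Python) =====
-- def extract_entity_idx_groups(labels):
--     entities = []
--     n = len(labels)
--     i = 0
--     while i < n:
--         label = labels[i]
--         if label.startswith('B-'):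
--             entity = label[2:]
--             indices = [i]
--             j = i + 1
--             while entity and j < n and labels[j] == 'I-' + entity:
--                 indices.append(j)
--                 j += 1
--             entities.append((entity, indices))
--             i = j
--         else:
--             i += 1
--     return entities
-- ===== Notes on version B (the rewrite author's own statement) =====
-- stated objective: alternative
-- what changed: Replaces the carried current_entity/current_indices state machine (with flush-on-B/I-mismatch/O and a final flush) by an index loop that anchors each group at its B- tag and extends it with a nested inner loop over the consecutive matching I- labels.
import Mathlib
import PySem

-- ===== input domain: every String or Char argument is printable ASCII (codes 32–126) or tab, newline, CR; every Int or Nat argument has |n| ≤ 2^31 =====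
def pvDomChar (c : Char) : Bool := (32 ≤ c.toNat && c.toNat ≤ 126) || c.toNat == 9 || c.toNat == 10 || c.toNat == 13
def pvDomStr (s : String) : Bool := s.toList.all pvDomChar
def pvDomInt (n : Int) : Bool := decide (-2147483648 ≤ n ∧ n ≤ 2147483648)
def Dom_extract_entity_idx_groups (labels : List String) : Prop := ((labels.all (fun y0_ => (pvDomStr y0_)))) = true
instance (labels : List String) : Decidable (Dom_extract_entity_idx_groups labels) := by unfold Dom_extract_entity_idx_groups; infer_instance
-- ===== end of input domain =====

-- B replaces A's carried current_entity/current_indices state machine by an index loop that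
-- anchors each group at its B- tag and extends it in a nested loop over the matching I- labels
-- (objective: alternative decomposition, same cost).

-- ===== PORT A =====
-- one iteration of A's for-loop; state = (entities, current_entity, current_indices)
def aStep (st : List (String × List Int) × Option String × List Int) (p : Int × String) :
    List (String × List Int) × Option String × List Int :=
  match st, p with
  | (entities, current_entity, current_indices), (index, label) =>
    if PySem.Str.startswith label "B-" then
      match current_entity with
      | some c => (entities ++ [(c, current_indices)], some (PySem.Str.slice label (some 2) none),
                   ([] : List Int) ++ [index])
      | none => (entities, some (PySem.Str.slice label (some 2) none), current_indices ++ [index])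
    else if PySem.Str.startswith label "I-" &&
            (match current_entity with | some c => c != "" | none => false) then
      match current_entity with
      | some c =>
        if PySem.Str.slice label (some 2) none = c then (entities, some c, current_indices ++ [index])
        else (entities ++ [(c, current_indices)], none, [])
      | none => (entities, none, current_indices)   -- unreachable: the guard forces some c, c ≠ ""
    else
      match current_entity with
      | some c => (entities ++ [(c, current_indices)], none, [])
      | none => (entities, current_entity, current_indices)

def extract_entity_idx_groups (labels : List String) : List (String × List Int) :=
  let st := (PySem.List.enumerate labels).foldl aStep ([], none, [])
  match st.2.1 with
  | some c => st.1 ++ [(c, st.2.2)]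
  | none => st.1

-- ===== PORT B =====
-- inner while loop: collect the run of indices j with labels[j] == 'I-' + entity
def bInner (labels : List String) (entity : String) (j : Nat) : List Int × Nat :=
  if h : entity ≠ "" ∧ j < labels.length ∧ labels.getD j "" = "I-" ++ entity then
    let r := bInner labels entity (j + 1)
    ((j : Int) :: r.1, r.2)
  else ([], j)
termination_by labels.length - j
decreasing_by omega

-- termination helper for the outer loop (the inner loop never moves backwards)
theorem bInner_le (labels : List String) (t : String) (j : Nat) : j ≤ (bInner labels t j).2 := by
  induction j using bInner.induct (labels := labels) (entity := t) with
  | case1 j h ih => rw [bInner, dif_pos h]; exact le_trans (Nat.le_succ j) ih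
  | case2 j h => rw [bInner, dif_neg h]

-- outer while loop over i
def bOuter (labels : List String) (i : Nat) : List (String × List Int) :=
  if hi : i < labels.length then
    if PySem.Str.startswith (labels.getD i "") "B-" then
      let entity := PySem.Str.slice (labels.getD i "") (some 2) none
      let r := bInner labels entity (i + 1)
      (entity, (i : Int) :: r.1) :: bOuter labels r.2
    else bOuter labels (i + 1)
  else []
termination_by labels.length - i
decreasing_by
  · have := bInner_le labels (PySem.Str.slice (labels.getD i "") (some 2) none) (i + 1); omega
  · omega

def extract_entity_idx_groups_alt (labels : List String) : List (String × List Int) :=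
  bOuter labels 0

-- ===== PRECONDITION & SPEC =====
def Spec_extract_entity_idx_groups (labels : List String) (out : List (String × List Int)) : Prop := out = extract_entity_idx_groups_alt labels
instance (labels : List String) (out : List (String × List Int)) : Decidable (Spec_extract_entity_idx_groups labels out) := by unfold Spec_extract_entity_idx_groups; infer_instance

-- ===== CLAIM (what is proved, stated in full; the proofs are below) =====
def Claim_equal_extract_entity_idx_groups : Prop := ∀ (labels : List String), Dom_extract_entity_idx_groups labels → Spec_extract_entity_idx_groups labels (extract_entity_idx_groups labels)

-- ===== LEMMAS AND PROOFS =====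

-- structural versions of B's two loops, over the enumerated suffix
def bExtendS (t : String) : List (Int × String) → List Int × List (Int × String)
  | [] => ([], [])
  | (j, l) :: rest =>
    if l = "I-" ++ t then
      let r := bExtendS t rest
      (j :: r.1, r.2)
    else ([], (j, l) :: rest)

theorem bExtendS_len (t : String) (xs : List (Int × String)) : (bExtendS t xs).2.length ≤ xs.length := by
  induction xs with
  | nil => simp [bExtendS]
  | cons p rest ih =>
    obtain ⟨j, l⟩ := p
    simp only [bExtendS]
    split_ifs
    · simpa using Nat.le_succ_of_le ih
    · simp

def bGoS : List (Int × String) → List (String × List Int)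
  | [] => []
  | (i, l) :: rest =>
    if PySem.Str.startswith l "B-" then
      let t := PySem.Str.slice l (some 2) none
      let p := if t = "" then (([] : List Int), rest) else bExtendS t rest
      (t, i :: p.1) :: bGoS p.2
    else bGoS rest
termination_by xs => xs.length
decreasing_by
  · have := bExtendS_len (PySem.Str.slice l (some 2) none) rest
    split_ifs <;> simp <;> omega
  · simp

-- A's final flush
def aFin (st : List (String × List Int) × Option String × List Int) : List (String × List Int) :=
  match st.2.1 with
  | some c => st.1 ++ [(c, st.2.2)]
  | none => st.1

-- what A's remaining run produces, given the carried state
def contA (cur : Option String) (idxs : List Int) (ps : List (Int × String)) : List (String × List Int) :=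
  match cur with
  | none => bGoS ps
  | some c =>
    if c = "" then ("", idxs) :: bGoS ps
    else (c, idxs ++ (bExtendS c ps).1) :: bGoS (bExtendS c ps).2

-- ---- string facts ----
theorem sw_B_not_I (l : String) (h : PySem.Chars.startswith l.toList ['B', '-'] = true) :
    PySem.Chars.startswith l.toList ['I', '-'] = false := by
  rw [PySem.Chars.startswith_iff] at h
  by_contra hI
  rw [Bool.not_eq_false, PySem.Chars.startswith_iff] at hI
  obtain ⟨u, hu⟩ := h
  obtain ⟨v, hv⟩ := hI
  rw [← hu] at hv
  simp at hv

theorem sw_I_recon (l : String) (h : PySem.Chars.startswith l.toList ['I', '-'] = true) :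
    l = "I-" ++ PySem.Str.slice l (some 2) none := by
  apply String.toList_inj.mp
  rw [String.toList_append, PySem.Str.toList_slice, PySem.Chars.slice_eq_listSlice,
    PySem.List.slice_from l.toList (by norm_num : (0:Int) ≤ 2)]
  rw [PySem.Chars.startswith_iff] at h
  obtain ⟨u, hu⟩ := h
  rw [← hu]
  simp [show ("I-" : String).toList = ['I', '-'] by decide]

theorem slice_app (c : String) : PySem.Str.slice ("I-" ++ c) (some 2) none = c := by
  apply String.toList_inj.mp
  rw [PySem.Str.toList_slice, PySem.Chars.slice_eq_listSlice,
    PySem.List.slice_from _ (by norm_num : (0:Int) ≤ 2), String.toList_append]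
  simp [show ("I-" : String).toList = ['I', '-'] by decide]

theorem sw_app_I (c : String) : PySem.Chars.startswith ("I-" ++ c).toList ['I', '-'] = true := by
  rw [PySem.Chars.startswith_iff, String.toList_append,
    show ("I-" : String).toList = ['I', '-'] by decide]
  exact ⟨c.toList, rfl⟩

theorem sw_app_B (c : String) : PySem.Chars.startswith ("I-" ++ c).toList ['B', '-'] = false := by
  by_contra h
  rw [Bool.not_eq_false] at h
  have := sw_B_not_I _ h
  rw [sw_app_I] at this
  simp at this

theorem slice_eq_iff (l c : String) (h : PySem.Chars.startswith l.toList ['I', '-'] = true) :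
    PySem.Str.slice l (some 2) none = c ↔ l = "I-" ++ c := by
  constructor
  · intro hs; rw [← hs]; exact sw_I_recon l h
  · intro he; rw [he, slice_app]

-- ---- reductions of A's step function ----
theorem aStep_none_B (ents : List (String × List Int)) (idxs : List Int) (i : Int) (l : String)
    (hB : PySem.Chars.startswith l.toList ['B', '-'] = true) :
    aStep (ents, none, idxs) (i, l) = (ents, some (PySem.Str.slice l (some 2) none), idxs ++ [i]) := by
  simp [aStep, hB]

theorem aStep_some_B (ents : List (String × List Int)) (idxs : List Int) (i : Int) (l c : String)
    (hB : PySem.Chars.startswith l.toList ['B', '-'] = true) :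
    aStep (ents, some c, idxs) (i, l)
      = (ents ++ [(c, idxs)], some (PySem.Str.slice l (some 2) none), [i]) := by
  simp [aStep, hB]

theorem aStep_none_nB (ents : List (String × List Int)) (idxs : List Int) (i : Int) (l : String)
    (hB : PySem.Chars.startswith l.toList ['B', '-'] = false) :
    aStep (ents, none, idxs) (i, l) = (ents, none, idxs) := by
  simp [aStep, hB]

theorem aStep_some_flush (ents : List (String × List Int)) (idxs : List Int) (i : Int) (l c : String)
    (hB : PySem.Chars.startswith l.toList ['B', '-'] = false)
    (hg : PySem.Chars.startswith l.toList ['I', '-'] = false ∨ c = "" ∨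
          PySem.Str.slice l (some 2) none ≠ c) :
    aStep (ents, some c, idxs) (i, l) = (ents ++ [(c, idxs)], none, []) := by
  simp only [aStep, bne]
  simp [hB]
  intro hI hc
  rcases hg with hg | hg | hg
  · simp [hg] at hI
  · exact absurd hg hc
  · exact hg

theorem aStep_some_ext (ents : List (String × List Int)) (idxs : List Int) (i : Int) (l c : String)
    (hB : PySem.Chars.startswith l.toList ['B', '-'] = false)
    (hI : PySem.Chars.startswith l.toList ['I', '-'] = true)
    (hc : c ≠ "") (hm : PySem.Str.slice l (some 2) none = c) :
    aStep (ents, some c, idxs) (i, l) = (ents, some c, idxs ++ [i]) := by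
  simp [aStep, hB, hI, hc, hm]

-- ---- equations for bGoS / contA ----
theorem bGoS_nil : bGoS [] = [] := by rw [bGoS]

theorem contA_none (idxs : List Int) (ps : List (Int × String)) :
    contA none idxs ps = bGoS ps := rfl

theorem contA_empty (idxs : List Int) (ps : List (Int × String)) :
    contA (some "") idxs ps = ("", idxs) :: bGoS ps := by simp [contA]

theorem bGoS_cons_B (i : Int) (l : String) (ps : List (Int × String))
    (hB : PySem.Chars.startswith l.toList ['B', '-'] = true) :
    bGoS ((i, l) :: ps) = contA (some (PySem.Str.slice l (some 2) none)) [i] ps := by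
  rw [bGoS]
  by_cases ht : PySem.Str.slice l (some 2) none = "" <;>
    simp [contA, ht, hB]

theorem bGoS_cons_nB (i : Int) (l : String) (ps : List (Int × String))
    (hB : PySem.Chars.startswith l.toList ['B', '-'] = false) :
    bGoS ((i, l) :: ps) = bGoS ps := by
  rw [bGoS]
  simp [hB]

theorem contA_ext (i : Int) (l c : String) (idxs : List Int) (ps : List (Int × String))
    (hc : c ≠ "") (hl : l = "I-" ++ c) :
    contA (some c) idxs ((i, l) :: ps) = contA (some c) (idxs ++ [i]) ps := by
  simp [contA, hc, bExtendS, hl]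

theorem contA_stop (i : Int) (l c : String) (idxs : List Int) (ps : List (Int × String))
    (hc : c ≠ "") (hne : l ≠ "I-" ++ c) :
    contA (some c) idxs ((i, l) :: ps) = (c, idxs) :: bGoS ((i, l) :: ps) := by
  simp [contA, hc, bExtendS, hne]

-- ---- main invariant: A's fold from any state produces ents ++ contA cur idxs ps ----
theorem aLoop_eq (ps : List (Int × String)) :
    ∀ (ents : List (String × List Int)) (cur : Option String) (idxs : List Int),
    (cur = none → idxs = []) →
    aFin (ps.foldl aStep (ents, cur, idxs)) = ents ++ contA cur idxs ps := by
  induction ps with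
  | nil =>
    intro ents cur idxs hinv
    match cur with
    | none => simp [aFin, contA, hinv rfl, bGoS_nil]
    | some c =>
      by_cases hc : c = "" <;>
        simp [aFin, contA, hc, bExtendS, bGoS_nil]
  | cons p ps ih =>
    obtain ⟨i, l⟩ := p
    intro ents cur idxs hinv
    rw [List.foldl_cons]
    by_cases hB : PySem.Chars.startswith l.toList ['B', '-'] = true
    · -- label starts with "B-"
      match cur with
      | none =>
        rw [aStep_none_B _ _ _ _ hB, ih _ _ _ (by simp), hinv rfl,
            contA_none, bGoS_cons_B _ _ _ hB]
        simp
      | some c =>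
        rw [aStep_some_B _ _ _ _ _ hB, ih _ _ _ (by simp)]
        by_cases hc : c = ""
        · subst hc
          rw [contA_empty, bGoS_cons_B _ _ _ hB]
          simp
        · have hne : l ≠ "I-" ++ c := by
            intro he
            rw [he, sw_app_B] at hB
            simp at hB
          rw [contA_stop _ _ _ _ _ hc hne, bGoS_cons_B _ _ _ hB]
          simp
    · -- label does not start with "B-"
      rw [Bool.not_eq_true] at hB
      match cur with
      | none =>
        rw [aStep_none_nB _ _ _ _ hB, ih _ _ _ hinv, contA_none, contA_none,
            bGoS_cons_nB _ _ _ hB]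
      | some c =>
        by_cases hc : c = ""
        · subst hc
          rw [aStep_some_flush _ _ _ _ _ hB (Or.inr (Or.inl rfl)), ih _ _ _ (by simp)]
          rw [contA_empty, bGoS_cons_nB _ _ _ hB, contA_none]
          simp
        · by_cases hl : l = "I-" ++ c
          · have hI : PySem.Chars.startswith l.toList ['I', '-'] = true := by
              rw [hl]; exact sw_app_I c
            have hm : PySem.Str.slice l (some 2) none = c := by rw [hl, slice_app]
            rw [aStep_some_ext _ _ _ _ _ hB hI hc hm, ih _ _ _ (by simp),
                contA_ext _ _ _ _ _ hc hl]
          · have hg : PySem.Chars.startswith l.toList ['I', '-'] = false ∨ c = "" ∨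
                PySem.Str.slice l (some 2) none ≠ c := by
              by_cases hI : PySem.Chars.startswith l.toList ['I', '-'] = true
              · exact Or.inr (Or.inr (fun hm => hl ((slice_eq_iff l c hI).mp hm)))
              · exact Or.inl (by simpa using hI)
            rw [aStep_some_flush _ _ _ _ _ hB hg, ih _ _ _ (by simp),
                contA_stop _ _ _ _ _ hc hl, bGoS_cons_nB _ _ _ hB, contA_none]
            simp
-- ---- B's index loops compute the structural loops on the enumerated suffix ----
theorem inner_eq (labels : List String) (t : String) (ht : t ≠ "") :
    ∀ d j, labels.length - j ≤ d →
    bExtendS t (PySem.List.enumerate (labels.drop j) (j : Int)) =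
      ((bInner labels t j).1,
        PySem.List.enumerate (labels.drop (bInner labels t j).2) ((bInner labels t j).2 : Int)) := by
  intro d
  induction d with
  | zero =>
    intro j hj
    have hge : labels.length ≤ j := by omega
    have hcond : ¬ (t ≠ "" ∧ j < labels.length ∧ labels.getD j "" = "I-" ++ t) := by
      intro h; omega
    rw [bInner, dif_neg hcond]
    simp [List.drop_eq_nil_of_le hge, bExtendS]
  | succ d ihd =>
    intro j hj
    by_cases hjn : j < labels.length
    · by_cases hl : labels.getD j "" = "I-" ++ t
      · have hcond : t ≠ "" ∧ j < labels.length ∧ labels.getD j "" = "I-" ++ t := ⟨ht, hjn, hl⟩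
        rw [bInner, dif_pos hcond]
        rw [List.drop_eq_getElem_cons hjn, PySem.List.enumerate_cons]
        have hget : labels[j] = "I-" ++ t := by
          rw [← List.getD_eq_getElem labels "" hjn]; exact hl
        simp only [bExtendS, hget]
        have hrec := ihd (j + 1) (by omega)
        rw [show ((j : Int) + 1) = ((j + 1 : Nat) : Int) by push_cast; ring, hrec]
        simp
      · have hget : labels[j] ≠ "I-" ++ t := by
          rw [← List.getD_eq_getElem labels "" hjn]; exact hl
        have hcond : ¬ (t ≠ "" ∧ j < labels.length ∧ labels.getD j "" = "I-" ++ t) := by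
          intro h; exact hl h.2.2
        rw [bInner, dif_neg hcond]
        rw [List.drop_eq_getElem_cons hjn, PySem.List.enumerate_cons]
        simp only [bExtendS, if_neg hget]
    · have hcond : ¬ (t ≠ "" ∧ j < labels.length ∧ labels.getD j "" = "I-" ++ t) := by
        intro h; omega
      rw [bInner, dif_neg hcond]
      simp [List.drop_eq_nil_of_le (by omega : labels.length ≤ j), bExtendS]

theorem outer_eq (labels : List String) :
    ∀ d i, labels.length - i ≤ d →
    bOuter labels i = bGoS (PySem.List.enumerate (labels.drop i) (i : Int)) := by
  intro d
  induction d with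
  | zero =>
    intro i hi
    rw [bOuter, dif_neg (by omega)]
    simp [List.drop_eq_nil_of_le (by omega : labels.length ≤ i), bGoS_nil]
  | succ d ihd =>
    intro i hi
    by_cases hin : i < labels.length
    · rw [List.drop_eq_getElem_cons hin, PySem.List.enumerate_cons]
      have hget : labels.getD i "" = labels[i] := List.getD_eq_getElem labels "" hin
      by_cases hB : PySem.Chars.startswith labels[i].toList ['B', '-'] = true
      · rw [bOuter, dif_pos hin, if_pos (by rw [hget]; simpa using hB)]
        simp only [hget]
        rw [bGoS_cons_B _ _ _ hB]
        by_cases ht : PySem.Str.slice labels[i] (some 2) none = ""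
        · have hinner : bInner labels "" (i + 1) = ([], i + 1) := by
            rw [bInner, dif_neg (by simp)]
          rw [ht, hinner, contA_empty]
          have hrec := ihd (i + 1) (by omega)
          rw [show ((i : Int) + 1) = ((i + 1 : Nat) : Int) by push_cast; ring, hrec]
        · have hie := inner_eq labels (PySem.Str.slice labels[i] (some 2) none) ht d (i + 1)
            (by omega)
          rw [show ((i : Int) + 1) = ((i + 1 : Nat) : Int) by push_cast; ring]
          simp only [contA, if_neg ht, hie]
          have hle := bInner_le labels (PySem.Str.slice labels[i] (some 2) none) (i + 1)
          rw [ihd (bInner labels (PySem.Str.slice labels[i] (some 2) none) (i + 1)).2 (by omega)]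
          simp
      · rw [bOuter, dif_pos hin,
          if_neg (by rw [hget]; simpa using hB)]
        rw [bGoS_cons_nB _ _ _ (by simpa using hB)]
        have hrec := ihd (i + 1) (by omega)
        rw [show ((i : Int) + 1) = ((i + 1 : Nat) : Int) by push_cast; ring, hrec]
    · rw [bOuter, dif_neg (by omega)]
      simp [List.drop_eq_nil_of_le (by omega : labels.length ≤ i), bGoS_nil]

-- ===== VERDICT (by name: the statement is the Claim_ definition above) =====
theorem extract_entity_idx_groups_spec : Claim_equal_extract_entity_idx_groups := by
  unfold Claim_equal_extract_entity_idx_groups Spec_extract_entity_idx_groups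
  intro labels _
  show extract_entity_idx_groups labels = extract_entity_idx_groups_alt labels
  have hA : extract_entity_idx_groups labels
      = aFin ((PySem.List.enumerate labels).foldl aStep ([], none, [])) := rfl
  rw [hA, aLoop_eq (PySem.List.enumerate labels) [] none [] (fun _ => rfl)]
  have hB : extract_entity_idx_groups_alt labels = bOuter labels 0 := rfl
  rw [hB, outer_eq labels labels.length 0 (by omega)]
  simp [contA]
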